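-- pv_equiv track=rewrite | github.com/kylerisse/fantasy-hockey-stats-2019 | generate.py | genPastMatches
-- ===== SOURCE A (Python) =====
-- matchesPerWeek = 12
--
-- def genPastMatches(date, team1, team2, team1wins, team2wins):
--     matches = []
--     i = 0
--     while i < matchesPerWeek:
--         while team1wins > 0:
--             matches.append([date, team1, team2, "1-0"])
--             team1wins -= 1
--             i += 1
--         while team2wins > 0:
--             matches.append([date, team1, team2, "0-1"])
--             team2wins -= 1
--             i += 1
--         if i < matchesPerWeek:
--             matches.append([date, team1, team2, "0-0"])
--             i += 1
--     return matches
-- ===== SOURCE B (Python) =====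
-- matchesPerWeek = 12
--
-- def genPastMatches(date, team1, team2, team1wins, team2wins):
--     t1 = max(team1wins, 0)
--     t2 = max(team2wins, 0)
--     total = t1 + t2 + max(0, matchesPerWeek - t1 - t2)
--     def score(k):
--         if k < t1:
--             return "1-0"
--         if k < t1 + t2:
--             return "0-1"
--         return "0-0"
--     return [[date, team1, team2, score(k)] for k in range(total)]
-- ===== Notes on version B (the rewrite author's own statement) =====
-- stated objective: alternative
-- what changed: Instead of A's nested while-loops that count down mutable win counters and an i slot counter, B computes the total number of rows in closed form and maps an index-to-score function over range(total), deciding each row's score by comparing its index against the two cumulative thresholds.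
import Mathlib
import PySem

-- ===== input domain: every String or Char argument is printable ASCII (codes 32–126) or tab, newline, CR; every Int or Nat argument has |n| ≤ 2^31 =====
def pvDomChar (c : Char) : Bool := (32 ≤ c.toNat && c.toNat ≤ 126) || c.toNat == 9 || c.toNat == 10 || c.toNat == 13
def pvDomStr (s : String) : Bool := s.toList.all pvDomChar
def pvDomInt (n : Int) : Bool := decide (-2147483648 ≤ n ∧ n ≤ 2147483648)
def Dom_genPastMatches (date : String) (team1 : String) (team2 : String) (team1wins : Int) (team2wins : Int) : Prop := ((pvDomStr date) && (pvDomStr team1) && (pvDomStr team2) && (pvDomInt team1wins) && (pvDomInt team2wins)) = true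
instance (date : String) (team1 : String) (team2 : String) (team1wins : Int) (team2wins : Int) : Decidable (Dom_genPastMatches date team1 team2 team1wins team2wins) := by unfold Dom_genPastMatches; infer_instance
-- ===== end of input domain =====

-- B replaces A's nested while-loops with mutating counters by a closed-form total row
-- count and an index→score map over range(total); same output, same cost.

-- ===== PORT A =====

-- inner 'while w > 0: matches.append(row); w -= 1; i += 1'; returns (matches, w, i).
-- The Nat fuel is only a totality guard (w.toNat steps always suffice, proved below).
def pvInnerGo (row : List String) : Nat → Int → Int → List (List String) →
    (List (List String)) × Int × Int
  | 0, w, i, acc => (acc, w, i)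
  | n + 1, w, i, acc =>
    if 0 < w then pvInnerGo row n (w - 1) (i + 1) (acc ++ [row]) else (acc, w, i)

def pvInner (row : List String) (w : Int) (i : Int) (acc : List (List String)) :
    (List (List String)) × Int × Int :=
  pvInnerGo row w.toNat w i acc

-- outer 'while i < matchesPerWeek' loop of A; fuel 13 always suffices (proved below):
-- each iteration increases i, and after the first one both win counters are ≤ 0.
def pvOuterGo (date team1 team2 : String) : Nat → Int → Int → Int → List (List String) →
    List (List String)
  | 0, _, _, _, acc => acc
  | n + 1, w1, w2, i, acc =>
    if i < 12 then
      match pvInner [date, team1, team2, "1-0"] w1 i acc with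
      | (acc1, w1', i1) =>
        match pvInner [date, team1, team2, "0-1"] w2 i1 acc1 with
        | (acc2, w2', i2) =>
          if i2 < 12 then
            pvOuterGo date team1 team2 n w1' w2' (i2 + 1) (acc2 ++ [[date, team1, team2, "0-0"]])
          else
            pvOuterGo date team1 team2 n w1' w2' i2 acc2
    else acc

def genPastMatches (date : String) (team1 : String) (team2 : String) (team1wins : Int) (team2wins : Int) : List (List String) :=
  pvOuterGo date team1 team2 13 team1wins team2wins 0 []

-- ===== PORT B =====

-- the index→score helper of Source B
def pvScore (t1 t2 : Int) (k : Int) : String :=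
  if k < t1 then "1-0" else if k < t1 + t2 then "0-1" else "0-0"

def genPastMatches_alt (date : String) (team1 : String) (team2 : String) (team1wins : Int) (team2wins : Int) : List (List String) :=
  let t1 : Int := max team1wins 0
  let t2 : Int := max team2wins 0
  let total : Int := t1 + t2 + max 0 (12 - t1 - t2)
  (PySem.List.pyRange 0 total 1).map (fun k => [date, team1, team2, pvScore t1 t2 k])

-- ===== PRECONDITION & SPEC =====
def Spec_genPastMatches (date : String) (team1 : String) (team2 : String) (team1wins : Int) (team2wins : Int) (out : List (List String)) : Prop := out = genPastMatches_alt date team1 team2 team1wins team2wins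
instance (date : String) (team1 : String) (team2 : String) (team1wins : Int) (team2wins : Int) (out : List (List String)) : Decidable (Spec_genPastMatches date team1 team2 team1wins team2wins out) := by unfold Spec_genPastMatches; infer_instance

-- ===== CLAIM (what is proved, stated in full; the proofs are below) =====
def Claim_equal_genPastMatches : Prop := ∀ (date : String) (team1 : String) (team2 : String) (team1wins : Int) (team2wins : Int), Dom_genPastMatches date team1 team2 team1wins team2wins → Spec_genPastMatches date team1 team2 team1wins team2wins (genPastMatches date team1 team2 team1wins team2wins)

-- ===== LEMMAS AND PROOFS =====

theorem pvInnerGo_spec (row : List String) :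
    ∀ (n : Nat) (w i : Int) (acc : List (List String)), w.toNat ≤ n →
      pvInnerGo row n w i acc =
        (acc ++ List.replicate w.toNat row, (if 0 < w then 0 else w), i + w.toNat) := by
  intro n
  induction n with
  | zero =>
    intro w i acc hle
    have hz : w.toNat = 0 := by omega
    have hw : ¬ 0 < w := by omega
    simp [pvInnerGo, hz, hw]
  | succ n ih =>
    intro w i acc hle
    by_cases h : 0 < w
    · rw [pvInnerGo, if_pos h, ih (w - 1) (i + 1) (acc ++ [row]) (by omega)]
      have hw : w.toNat = (w - 1).toNat + 1 := by omega
      rw [hw, List.replicate_succ]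
      simp only [Prod.mk.injEq]
      refine ⟨by simp, ?_, ?_⟩
      · split_ifs <;> omega
      · push_cast; omega
    · rw [pvInnerGo, if_neg h]
      have hz : w.toNat = 0 := by omega
      simp [hz, h]

theorem pvInner_spec (row : List String) (w i : Int) (acc : List (List String)) :
    pvInner row w i acc =
      (acc ++ List.replicate w.toNat row, (if 0 < w then 0 else w), i + w.toNat) :=
  pvInnerGo_spec row w.toNat w i acc le_rfl

-- after the first outer iteration both win counters are ≤ 0: the loop just fills draws
theorem pvOuterGo_drain (date team1 team2 : String) :
    ∀ (n : Nat) (w1 w2 i : Int) (acc : List (List String)),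
      ¬ 0 < w1 → ¬ 0 < w2 → (12 - i).toNat ≤ n →
      pvOuterGo date team1 team2 n w1 w2 i acc =
        acc ++ List.replicate (12 - i).toNat [date, team1, team2, "0-0"] := by
  intro n
  induction n with
  | zero =>
    intro w1 w2 i acc _ _ hle
    have hz : (12 - i).toNat = 0 := by omega
    simp [pvOuterGo, hz]
  | succ n ih =>
    intro w1 w2 i acc h1 h2 hle
    by_cases h : i < 12
    · rw [pvOuterGo, if_pos h]
      simp only [pvInner_spec, if_neg h1, if_neg h2]
      have hz1 : w1.toNat = 0 := by omega
      have hz2 : w2.toNat = 0 := by omega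
      simp only [hz1, hz2, List.replicate_zero, List.append_nil, Int.ofNat_zero, add_zero]
      rw [if_pos h, ih w1 w2 (i + 1) _ h1 h2 (by omega)]
      have hr : (12 - i).toNat = (12 - (i + 1)).toNat + 1 := by omega
      rw [hr, List.replicate_succ, List.append_assoc]
      rfl
    · rw [pvOuterGo, if_neg h]
      have hz : (12 - i).toNat = 0 := by omega
      simp [hz]

-- A in closed form: wins, then losses, then draws filling to 12
theorem genPastMatches_closed (date team1 team2 : String) (w1 w2 : Int) :
    genPastMatches date team1 team2 w1 w2 =
      List.replicate w1.toNat [date, team1, team2, "1-0"] ++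
      List.replicate w2.toNat [date, team1, team2, "0-1"] ++
      List.replicate (12 - (w1.toNat : Int) - w2.toNat).toNat [date, team1, team2, "0-0"] := by
  unfold genPastMatches
  rw [pvOuterGo]
  rw [if_pos (by norm_num : (0:Int) < 12)]
  simp only [pvInner_spec]
  have hn1 : ¬ 0 < (if 0 < w1 then (0:Int) else w1) := by split_ifs <;> omega
  have hn2 : ¬ 0 < (if 0 < w2 then (0:Int) else w2) := by split_ifs <;> omega
  by_cases h3 : (0 : Int) + w1.toNat + w2.toNat < 12
  · rw [if_pos h3]
    rw [pvOuterGo_drain _ _ _ _ _ _ _ _ hn1 hn2 (by omega)]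
    have hd : (12 - (w1.toNat : Int) - w2.toNat).toNat
        = (12 - (0 + (w1.toNat : Int) + w2.toNat + 1)).toNat + 1 := by omega
    rw [hd, List.replicate_succ, List.append_assoc, List.append_assoc]
    simp
  · rw [if_neg h3]
    rw [pvOuterGo_drain _ _ _ _ _ _ _ _ hn1 hn2 (by omega)]
    have hz1 : (12 - (0 + (w1.toNat : Int) + w2.toNat)).toNat = 0 := by omega
    have hz2 : (12 - (w1.toNat : Int) - w2.toNat).toNat = 0 := by omega
    rw [hz1, hz2]
    simp

-- a map of a constant-valued function over List.range is a replicate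
theorem map_range_const {α : Type} (f : Nat → α) (c : α) (n : Nat)
    (h : ∀ k < n, f k = c) : (List.range n).map f = List.replicate n c := by
  apply List.ext_getElem
  · simp
  · intro i h1 h2
    have hi : i < n := by simpa using h2
    simp [h i hi]

-- ===== VERDICT (by name: the statement is the Claim_ definition above) =====
theorem genPastMatches_spec : Claim_equal_genPastMatches := by
  intro date team1 team2 w1 w2 _
  unfold Spec_genPastMatches
  simp only [genPastMatches_alt]
  rw [genPastMatches_closed]
  set t1 : Int := max w1 0 with ht1
  set t2 : Int := max w2 0 with ht2
  have e1 : w1.toNat = t1.toNat := by omega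
  have e2 : w2.toNat = t2.toNat := by omega
  have etot : (t1 + t2 + max 0 (12 - t1 - t2) - 0).toNat
      = t1.toNat + (t2.toNat + (12 - (w1.toNat : Int) - w2.toNat).toNat) := by omega
  rw [PySem.List.pyRange_one, List.map_map, etot]
  rw [List.range_add, List.map_append, List.map_map, List.range_add, List.map_append,
    List.map_map]
  rw [e1, e2, List.append_assoc]
  congr 1
  · symm
    apply map_range_const
    intro k hk
    have h0 : ((0 : Int) + (k : Int)) < t1 := by omega
    simp only [Function.comp, pvScore]
    rw [if_pos h0]
  congr 1
  · symm
    apply map_range_const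
    intro k hk
    have h1 : ¬ ((0 : Int) + ((t1.toNat + k : Nat) : Int)) < t1 := by push_cast; omega
    have h2 : ((0 : Int) + ((t1.toNat + k : Nat) : Int)) < t1 + t2 := by push_cast; omega
    simp only [Function.comp, pvScore]
    rw [if_neg h1, if_pos h2]
  · symm
    apply map_range_const
    intro k hk
    have hd : k < (12 - t1 - t2).toNat := by omega
    have h2 : ¬ ((0 : Int) + ((t1.toNat + (t2.toNat + k) : Nat) : Int)) < t1 + t2 := by
      push_cast; omega
    have h1 : ¬ ((0 : Int) + ((t1.toNat + (t2.toNat + k) : Nat) : Int)) < t1 := by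
      push_cast; omega
    simp only [Function.comp, pvScore]
    rw [if_neg h1, if_neg h2]
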